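-- pv_equiv track=rewrite | github.com/xblanc33/desktop_gui_mcp | desktop_gui_mcp/server.py | _keys_to_text
-- ===== SOURCE A (Python) =====
-- from typing import Annotated, Literal, Optional, Sequence, TypedDict
--
-- def _keys_to_text(keys: Sequence[str]) -> Optional[str]:
--     text_chars: list[str] = []
--     for key in keys:
--         if len(key) == 1:
--             text_chars.append(key)
--         elif key == "space":
--             text_chars.append(" ")
--         else:
--             return None
--     return "".join(text_chars)
-- ===== SOURCE B (Python) =====
-- def _keys_to_text(keys):
--     # Divide and conquer: split the sequence in halves, translate each half
--     # recursively, and concatenate; None (an invalid key) propagates upward.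
--     n = len(keys)
--     if n == 0:
--         return ""
--     if n == 1:
--         k = keys[0]
--         if len(k) == 1:
--             return k
--         return " " if k == "space" else None
--     mid = n // 2
--     left = _keys_to_text(keys[:mid])
--     if left is None:
--         return None
--     right = _keys_to_text(keys[mid:])
--     return None if right is None else left + right
-- ===== Notes on version B (the rewrite author's own statement) =====
-- stated objective: alternative
-- what changed: Replaced the left-to-right fused scan with a divide-and-conquer recursion: split the key list in halves, translate each half recursively (base cases: empty -> '', single key -> its char or None), and concatenate the halves, propagating None upward.
import Mathlib
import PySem

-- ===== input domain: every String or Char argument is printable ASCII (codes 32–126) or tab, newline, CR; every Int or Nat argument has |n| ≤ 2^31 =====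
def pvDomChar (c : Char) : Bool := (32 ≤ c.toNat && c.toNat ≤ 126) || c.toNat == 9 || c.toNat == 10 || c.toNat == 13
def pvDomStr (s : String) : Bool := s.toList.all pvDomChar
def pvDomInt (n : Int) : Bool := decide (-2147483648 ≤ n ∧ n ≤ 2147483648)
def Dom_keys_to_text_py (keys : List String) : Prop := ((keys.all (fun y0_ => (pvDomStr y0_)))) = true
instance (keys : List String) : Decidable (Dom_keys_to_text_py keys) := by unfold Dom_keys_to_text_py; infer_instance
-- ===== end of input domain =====

-- B replaces A's fused left-to-right scan by a divide-and-conquer recursion (alternative decomposition, same results).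

-- ===== PORT A =====
-- A: fused loop building a char accumulator, returning None on the first invalid key.
def keys_to_text_go (keys : List String) (acc : List Char) : Option String :=
  match keys with
  | [] => some (String.ofList acc)
  | key :: rest =>
    if key.toList.length = 1 then keys_to_text_go rest (acc ++ key.toList)
    else if key == "space" then keys_to_text_go rest (acc ++ [' '])
    else none

def keys_to_text_py (keys : List String) : Option String :=
  keys_to_text_go keys []

-- ===== PORT B =====
-- B: divide and conquer — split in halves, recurse, concatenate; None propagates.
def keys_to_text_py_alt (keys : List String) : Option String :=
  match keys with
  | [] => some ""
  | [k] =>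
    if k.toList.length = 1 then some k
    else if k == "space" then some " " else none
  | a :: b :: rest =>
    let l := a :: b :: rest
    let mid := l.length / 2
    match keys_to_text_py_alt (l.take mid) with
    | none => none
    | some left =>
      match keys_to_text_py_alt (l.drop mid) with
      | none => none
      | some right => some (left ++ right)
termination_by keys.length
decreasing_by
  · simp [List.length_take]; omega
  · simp [List.length_drop]; omega

-- ===== PRECONDITION & SPEC =====
def Spec_keys_to_text_py (keys : List String) (out : Option String) : Prop := out = keys_to_text_py_alt keys
instance (keys : List String) (out : Option String) : Decidable (Spec_keys_to_text_py keys out) := by unfold Spec_keys_to_text_py; infer_instance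

-- ===== CLAIM (what is proved, stated in full; the proofs are below) =====
def Claim_equal_keys_to_text_py : Prop := ∀ (keys : List String), Dom_keys_to_text_py keys → Spec_keys_to_text_py keys (keys_to_text_py keys)

-- ===== LEMMAS AND PROOFS =====
-- Common reference function at the List Char level: valid ⟹ joined translation, else none.
def kttChars (keys : List String) : Option (List Char) :=
  if keys.all (fun key => key.toList.length == 1 || key == "space") then
    some ((keys.map (fun key => if key == "space" then [' '] else key.toList)).flatten)
  else none

theorem keys_to_text_go_eq (keys : List String) : ∀ (acc : List Char),
    keys_to_text_go keys acc =
      (kttChars keys).map (fun cs => String.ofList (acc ++ cs)) := by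
  induction keys with
  | nil => intro acc; simp [keys_to_text_go, kttChars]
  | cons key rest ih =>
    intro acc
    by_cases h2 : key = "space"
    · subst h2
      simp only [keys_to_text_go, kttChars, List.all_cons] at *
      simp [ih]
    · by_cases h1 : key.toList.length = 1
      · have h1' : key.length = 1 := by rw [← String.length_toList]; exact h1
        simp only [keys_to_text_go, kttChars, List.all_cons] at *
        simp [h1, h2, ih]
      · have h1' : ¬ key.length = 1 := by rw [← String.length_toList]; exact h1
        simp [keys_to_text_go, kttChars, h1', h2]

theorem kttChars_append (l1 l2 : List String) :
    kttChars (l1 ++ l2) =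
      match kttChars l1 with
      | none => none
      | some a =>
        match kttChars l2 with
        | none => none
        | some b => some (a ++ b) := by
  simp only [kttChars, List.all_append, List.map_append, List.flatten_append]
  cases hb1 : l1.all (fun key => key.toList.length == 1 || key == "space") <;>
    cases hb2 : l2.all (fun key => key.toList.length == 1 || key == "space") <;>
      simp only [Bool.false_and, Bool.and_false, Bool.and_self] <;> rfl

theorem alt_eq_spec : ∀ (n : Nat) (keys : List String), keys.length ≤ n →
    keys_to_text_py_alt keys = (kttChars keys).map String.ofList := by
  intro n
  induction n with
  | zero =>
    intro keys h
    have : keys = [] := List.eq_nil_of_length_eq_zero (Nat.le_zero.mp h)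
    subst this
    simp [keys_to_text_py_alt, kttChars]
  | succ n ih =>
    intro keys h
    match keys with
    | [] =>
      simp [keys_to_text_py_alt, kttChars]
    | [k] =>
      by_cases h2 : k = "space"
      · subst h2
        simp [keys_to_text_py_alt, kttChars]
      · by_cases h1 : k.toList.length = 1
        · have h1' : k.length = 1 := by rw [← String.length_toList]; exact h1
          simp [keys_to_text_py_alt, kttChars, h1, h1', h2, String.ofList_toList]
        · have h1' : ¬ k.length = 1 := by rw [← String.length_toList]; exact h1
          simp [keys_to_text_py_alt, kttChars, h1', h2]
    | a :: b :: rest =>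
      rw [keys_to_text_py_alt]
      have hlen : (a :: b :: rest).length = rest.length + 2 := by simp
      have htake : ((a :: b :: rest).take ((a :: b :: rest).length / 2)).length ≤ n := by
        simp [List.length_take]; simp at h; omega
      have hdrop : ((a :: b :: rest).drop ((a :: b :: rest).length / 2)).length ≤ n := by
        simp [List.length_drop]; simp at h; omega
      rw [ih _ htake, ih _ hdrop]
      conv_rhs => rw [show (a :: b :: rest) = (a :: b :: rest).take ((a :: b :: rest).length / 2) ++ (a :: b :: rest).drop ((a :: b :: rest).length / 2) from (List.take_append_drop _ _).symm]
      rw [kttChars_append]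
      cases kttChars ((a :: b :: rest).take ((a :: b :: rest).length / 2)) with
      | none => rfl
      | some left =>
        cases kttChars ((a :: b :: rest).drop ((a :: b :: rest).length / 2)) with
        | none => rfl
        | some right => simp [String.ofList_append]

-- ===== VERDICT (by name: the statement is the Claim_ definition above) =====
theorem keys_to_text_py_spec : Claim_equal_keys_to_text_py := by
  intro keys _
  unfold Spec_keys_to_text_py keys_to_text_py
  rw [alt_eq_spec keys.length keys le_rfl, keys_to_text_go_eq]
  simp
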